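-- pv_equiv track=rewrite | github.com/fenre/splunk-monitoring-use-cases | scripts/audit_compliance_gaps.py | _rank_assurance
-- ===== SOURCE A (Python) =====
-- from typing import Any, Dict, Iterable, List, Mapping, Optional, Sequence, Tuple
--
-- ASSURANCE_RANK: Dict[str, int] = {
--     "full": 3,
--     "partial": 2,
--     "contributing": 1,
-- }
--
-- def _rank_assurance(values: Sequence[str]) -> Optional[str]:
--     best: Optional[str] = None
--     best_rank = -1
--     for v in values:
--         key = (v or "").strip().lower()
--         if not key:
--             continue
--         rank = ASSURANCE_RANK.get(key, 0)
--         if rank > best_rank: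
--             best_rank = rank
--             best = key
--     return best
-- ===== SOURCE B (Python) =====
-- def _rank_assurance(values):
--     keys = [k for k in ((v or "").strip().lower() for v in values) if k]
--     if not keys:
--         return None
--     for name in ("full", "partial", "contributing"):
--         if name in keys:
--             return name
--     return keys[0]
-- ===== Notes on version B (the rewrite author's own statement) =====
-- stated objective: idiomatic
-- what changed: Replaces the running best/best_rank single scan with building the normalized non-empty key list once and then probing it by priority (full, partial, contributing), falling back to the first key.
import Mathlib
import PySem

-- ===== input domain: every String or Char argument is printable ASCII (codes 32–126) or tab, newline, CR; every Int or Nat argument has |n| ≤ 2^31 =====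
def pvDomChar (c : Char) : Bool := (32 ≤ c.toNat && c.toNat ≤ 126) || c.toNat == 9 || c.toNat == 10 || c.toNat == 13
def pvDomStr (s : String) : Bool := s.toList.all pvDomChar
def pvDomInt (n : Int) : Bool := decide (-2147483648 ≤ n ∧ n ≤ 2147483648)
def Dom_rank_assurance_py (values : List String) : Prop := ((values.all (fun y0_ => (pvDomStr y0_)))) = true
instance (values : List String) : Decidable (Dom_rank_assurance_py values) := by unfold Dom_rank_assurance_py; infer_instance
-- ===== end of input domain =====

-- B rebuilds the result as a build-then-priority-probe over the normalized key list; same value as A everywhere (objective: idiomatic).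

-- ===== PORT A =====
def ASSURANCE_RANK : PySem.Dict String Int :=
  PySem.Dict.ofList [("full", 3), ("partial", 2), ("contributing", 1)]

-- 'v or ""' on a string evaluates to v itself (when v = "" the result is "" = v); strip/lower via PySem (exact on the ASCII domain)
def rank_assurance_py (values : List String) : Option String :=
  (values.foldl (fun st v =>
    let key := PySem.Str.lower (PySem.Str.strip v)
    if key = "" then st
    else
      let rank := PySem.Dict.getD ASSURANCE_RANK key 0
      if rank > st.2 then (some key, rank) else st) (none, -1)).1

-- ===== PORT B =====
def rank_assurance_py_alt (values : List String) : Option String :=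
  let keys := (values.map (fun v => PySem.Str.lower (PySem.Str.strip v))).filter (fun k => decide (k ≠ ""))
  match keys with
  | [] => none
  | k :: _ =>
    if keys.contains "full" then some "full"
    else if keys.contains "partial" then some "partial"
    else if keys.contains "contributing" then some "contributing"
    else some k

-- ===== PRECONDITION & SPEC =====
def Spec_rank_assurance_py (values : List String) (out : Option String) : Prop := out = rank_assurance_py_alt values
instance (values : List String) (out : Option String) : Decidable (Spec_rank_assurance_py values out) := by unfold Spec_rank_assurance_py; infer_instance

-- ===== CLAIM (what is proved, stated in full; the proofs are below) =====
def Claim_equal_rank_assurance_py : Prop := ∀ (values : List String), Dom_rank_assurance_py values → Spec_rank_assurance_py values (rank_assurance_py values)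

-- ===== LEMMAS AND PROOFS =====

def pvRank (k : String) : Int :=
  if k = "full" then 3 else if k = "partial" then 2 else if k = "contributing" then 1 else 0

-- A's fold step on an already-normalized non-skipped key
def pvCore (st : Option String × Int) (k : String) : Option String × Int :=
  if pvRank k > st.2 then (some k, pvRank k) else st

lemma AR_items : ASSURANCE_RANK = PySem.Dict.mk [("full", 3), ("partial", 2), ("contributing", 1)] := by decide

lemma pvRank_eq (k : String) : PySem.Dict.getD ASSURANCE_RANK k 0 = pvRank k := by
  rw [AR_items]
  unfold pvRank
  by_cases h1 : k = "full"
  · simp [h1, PySem.Dict.getD, PySem.Dict.get?_mk_cons]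
  · by_cases h2 : k = "partial"
    · simp [h2, PySem.Dict.getD, PySem.Dict.get?_mk_cons]
    · by_cases h3 : k = "contributing"
      · simp [h3, PySem.Dict.getD, PySem.Dict.get?_mk_cons]
      · simp [h1, h2, h3, PySem.Dict.getD, PySem.Dict.get?,
          Ne.symm h1, Ne.symm h2, Ne.symm h3]

lemma foldA_eq (values : List String) :
    rank_assurance_py values =
      (((values.map (fun v => PySem.Str.lower (PySem.Str.strip v))).filter
        (fun k => decide (k ≠ ""))).foldl pvCore (none, -1)).1 := by
  unfold rank_assurance_py
  rw [PySem.List.foldl_congr_mem _ _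
    (fun st v => if PySem.Str.lower (PySem.Str.strip v) ≠ "" then pvCore st (PySem.Str.lower (PySem.Str.strip v)) else st) _
    (by
      intro st v _
      simp only [pvCore, pvRank_eq]
      by_cases h : PySem.Str.lower (PySem.Str.strip v) = "" <;> simp [h])]
  rw [← List.foldl_map (f := fun v => PySem.Str.lower (PySem.Str.strip v))
      (g := fun st k => if k ≠ "" then pvCore st k else st)]
  rw [PySem.List.foldl_ite_eq_foldl_filter (fun k => k ≠ "") pvCore]

lemma pvClass (s : String) : (s = "full" ∧ pvRank s = 3) ∨ (s = "partial" ∧ pvRank s = 2) ∨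
    (s = "contributing" ∧ pvRank s = 1) ∨ (s ≠ "full" ∧ s ≠ "partial" ∧ s ≠ "contributing" ∧ pvRank s = 0) := by
  unfold pvRank; split_ifs <;> simp_all
lemma pvCore_state (b k : String) :
    pvCore (some b, pvRank b) k = if pvRank k > pvRank b then (some k, pvRank k) else (some b, pvRank b) := rfl
lemma foldA_inv (ks : List String) : ∀ (b : String),
    ks.foldl pvCore (some b, pvRank b) =
      (if b = "full" ∨ ks.contains "full" then (some "full", (3:Int))
       else if b = "partial" ∨ ks.contains "partial" then (some "partial", 2)
       else if b = "contributing" ∨ ks.contains "contributing" then (some "contributing", 1)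
       else (some b, pvRank b)) := by
  induction ks with
  | nil =>
    intro b
    rcases pvClass b with ⟨hb,hrb⟩|⟨hb,hrb⟩|⟨hb,hrb⟩|⟨hb1,hb2,hb3,hrb⟩ <;>
      simp_all [List.foldl_nil]
  | cons k ks ih =>
    intro b
    simp only [List.foldl_cons, List.contains_cons, pvCore_state]
    rcases pvClass k with ⟨hk,hrk⟩|⟨hk,hrk⟩|⟨hk,hrk⟩|⟨hk1,hk2,hk3,hrk⟩ <;>
      rcases pvClass b with ⟨hb,hrb⟩|⟨hb,hrb⟩|⟨hb,hrb⟩|⟨hb1,hb2,hb3,hrb⟩ <;>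
      by_cases hcmp : pvRank k > pvRank b <;>
      (first | rw [if_pos hcmp, ih k] | rw [if_neg hcmp, ih b]) <;>
      rw [hrk, hrb] at hcmp <;> simp_all <;>
      (try simp [Ne.symm hk1, Ne.symm hk2, Ne.symm hk3])

-- ===== VERDICT (by name: the statement is the Claim_ definition above) =====
theorem rank_assurance_py_spec : Claim_equal_rank_assurance_py := by
  intro values _
  unfold Spec_rank_assurance_py rank_assurance_py_alt
  rw [foldA_eq]
  cases hks : (values.map (fun v => PySem.Str.lower (PySem.Str.strip v))).filter
      (fun k => decide (k ≠ "")) with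
  | nil => simp
  | cons k ks =>
    simp only [List.foldl_cons]
    rw [show pvCore (none, -1) k = (some k, pvRank k) from by
      unfold pvCore pvRank; split_ifs <;> simp_all]
    rw [foldA_inv]
    simp only [List.contains_cons]
    rcases pvClass k with ⟨hk,hrk⟩|⟨hk,hrk⟩|⟨hk,hrk⟩|⟨hk1,hk2,hk3,hrk⟩ <;> simp_all <;>
      (try simp [Ne.symm hk1, Ne.symm hk2, Ne.symm hk3]) <;>
      (try split_ifs <;> simp_all)
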